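-- pv_equiv track=rewrite | github.com/arfiepadilla/money-tracker | TextTransposer/text_transposer_server.py | transpose_words
-- ===== SOURCE A (Python) =====
-- def transpose_words(text: str) -> str:
--     """
--     Transpose text by treating each word as a column.
--
--     Example:
--         Input:  "hello world"
--         Output: "h w\ne o\nl r\nl l\no d"
--     """
--     words = text.split()
--     if not words:
--         return ""
--
--     max_len = max(len(word) for word in words)
--     padded_words = [word.ljust(max_len) for word in words]
--
--     transposed = []
--     for char_idx in range(max_len):
--         row = " ".join(word[char_idx] for word in padded_words)
--         transposed.append(row)
--
--     return "\n".join(transposed)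
-- ===== SOURCE B (Python) =====
-- def transpose_words(text: str) -> str:
--     # Consume the words head-by-head (zip_longest style), no max_len/ljust padding pass.
--     cols = [list(w) for w in text.split()]
--     rows = []
--     while any(cols):
--         rows.append(" ".join(c.pop(0) if c else " " for c in cols))
--     return "\n".join(rows)
-- ===== Notes on version B (the rewrite author's own statement) =====
-- stated objective: simpler
-- what changed: B streams the transposition zip_longest-style: while any word still has characters it pops each word's next character (a space for exhausted words) to form a row, instead of A's computing max_len, ljust-padding every word and indexing each column.
import Mathlib
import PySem

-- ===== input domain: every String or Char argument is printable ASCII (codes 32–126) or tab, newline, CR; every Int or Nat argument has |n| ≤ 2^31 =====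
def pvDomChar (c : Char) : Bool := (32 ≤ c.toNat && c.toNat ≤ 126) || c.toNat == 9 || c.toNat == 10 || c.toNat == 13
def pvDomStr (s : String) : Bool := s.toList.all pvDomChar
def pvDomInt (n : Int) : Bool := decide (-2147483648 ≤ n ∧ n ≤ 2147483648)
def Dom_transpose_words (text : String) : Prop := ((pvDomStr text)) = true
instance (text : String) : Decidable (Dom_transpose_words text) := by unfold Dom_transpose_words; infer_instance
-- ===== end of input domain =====

-- B consumes the words head-by-head (zip_longest style) instead of A's max_len/ljust padding passes; objective: simpler.

-- ===== PORT A =====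
-- Literal port of A at the char-list level (PySem.Chars.split₀ = str.split(), PySem.Chars.join = sep.join).
-- range(max_len) is ported as List.range maxLen (exact: max_len is a nonnegative length), and
-- word[char_idx] as List.getD (exact: char_idx < max_len = length of every padded word, so no IndexError);
-- the .getD 0 on max? is unreachable (words ≠ [] is guarded just above, as in the Python).
def transpose_words (text : String) : String :=
  let words := PySem.Chars.split₀ text.toList
  if words = [] then ""
  else
    let maxLen := (PySem.List.max? (words.map List.length) (fun x => x)).getD 0
    let padded := words.map (fun w => w ++ List.replicate (maxLen - w.length) ' ')
    let transposed := (List.range maxLen).map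
      (fun charIdx => PySem.Chars.join [' '] (padded.map (fun w => [w.getD charIdx ' '])))
    String.ofList (PySem.Chars.join ['\n'] transposed)

-- ===== PORT B =====
-- termination fact for rowsOf's while-loop (cited by name in decreasing_by)
theorem pv_tail_sum_le (l : List (List Char)) :
    ((l.map List.tail).map List.length).sum ≤ (l.map List.length).sum := by
  induction l with
  | nil => simp
  | cons a t ih =>
    simp only [List.map_cons, List.sum_cons]
    have h1 : a.tail.length ≤ a.length := by cases a <;> simp
    omega

theorem pv_tail_sum_lt (cols : List (List Char))
    (h : cols.any (fun c => !c.isEmpty) = true) :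
    ((cols.map List.tail).map List.length).sum < (cols.map List.length).sum := by
  induction cols with
  | nil => simp at h
  | cons a t ih =>
    simp only [List.any_cons, Bool.or_eq_true] at h
    simp only [List.map_cons, List.sum_cons]
    rcases h with h | h
    · have ha : a ≠ [] := by simpa using h
      have h2 : a.tail.length < a.length := by
        cases a with
        | nil => exact absurd rfl ha
        | cons x xs => simp
      have := pv_tail_sum_le t
      omega
    · have := ih h
      have h2 : a.tail.length ≤ a.length := by cases a <;> simp
      omega

-- Source B's while-loop: while some column is nonempty, emit the heads (a space for an exhausted
-- column) as a row and continue with the tails.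
def rowsOf (cols : List (List Char)) : List (List Char) :=
  if cols.any (fun c => !c.isEmpty) then
    (cols.map (fun c => c.headD ' ')) :: rowsOf (cols.map List.tail)
  else []
termination_by (cols.map List.length).sum
decreasing_by
  simpa using pv_tail_sum_lt cols (by assumption)

def transpose_words_alt (text : String) : String :=
  let cols := PySem.Chars.split₀ text.toList
  String.ofList (PySem.Chars.join ['\n']
    ((rowsOf cols).map (fun r => PySem.Chars.join [' '] (r.map (fun c => [c])))))

-- ===== PRECONDITION & SPEC =====
def Spec_transpose_words (text : String) (out : String) : Prop := out = transpose_words_alt text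
instance (text : String) (out : String) : Decidable (Spec_transpose_words text out) := by unfold Spec_transpose_words; infer_instance

-- ===== CLAIM (what is proved, stated in full; the proofs are below) =====
def Claim_equal_transpose_words : Prop := ∀ (text : String), Dom_transpose_words text → Spec_transpose_words text (transpose_words text)

-- ===== LEMMAS AND PROOFS =====

-- padding with spaces does not change a space-defaulted getD
theorem pv_getD_pad (w : List Char) (k i : Nat) :
    (w ++ List.replicate k ' ').getD i ' ' = w.getD i ' ' := by
  induction w generalizing i with
  | nil =>
    rcases Nat.lt_or_ge i k with h | h
    · simp [List.getD_eq_getElem?_getD, h]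
    · simp [List.getD_eq_getElem?_getD, Nat.not_lt.mpr h]
  | cons a w ih =>
    cases i with
    | zero => simp
    | succ i => simpa using ih i

theorem pv_fold_tail (cols : List (List Char)) :
    ∀ a : Nat, ((cols.map List.tail).map List.length).foldl max (a - 1)
      = ((cols.map List.length).foldl max a) - 1 := by
  induction cols with
  | nil => intro a; simp
  | cons c t ih =>
    intro a
    simp only [List.map_cons, List.foldl_cons]
    have h1 : c.tail.length = c.length - 1 := by cases c <;> simp
    rw [h1]
    have h2 : max (a - 1) (c.length - 1) = max a c.length - 1 := by omega
    rw [h2]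
    exact ih (max a c.length)

theorem pv_fold_eq_zero (ls : List Nat) :
    ∀ a : Nat, (ls.foldl max a = 0 ↔ a = 0 ∧ ∀ x ∈ ls, x = 0) := by
  induction ls with
  | nil => intro a; simp
  | cons x t ih =>
    intro a
    simp only [List.foldl_cons, List.mem_cons]
    rw [ih (max a x)]
    constructor
    · rintro ⟨h1, h2⟩
      refine ⟨by omega, ?_⟩
      rintro y (rfl | hy)
      · omega
      · exact h2 y hy
    · rintro ⟨h1, h2⟩
      have hx := h2 x (Or.inl rfl)
      exact ⟨by omega, fun y hy => h2 y (Or.inr hy)⟩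

theorem pv_any_false_iff (cols : List (List Char)) :
    cols.any (fun c => !c.isEmpty) = false ↔ ∀ c ∈ cols, c = [] := by
  simp [List.any_eq_false]

-- B's loop produces exactly A's rows: row i holds each word's i-th char (space past the end)
theorem pv_rowsOf_eq (n : Nat) : ∀ cols : List (List Char),
    (cols.map List.length).foldl max 0 = n →
    rowsOf cols = (List.range n).map (fun i => cols.map (fun w => w.getD i ' ')) := by
  induction n with
  | zero =>
    intro cols h
    have hall := ((pv_fold_eq_zero (cols.map List.length) 0).mp h).2
    have hany : cols.any (fun c => !c.isEmpty) = false := by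
      rw [pv_any_false_iff]
      intro c hc
      have hlen : c.length = 0 := hall c.length (List.mem_map_of_mem hc)
      exact List.eq_nil_of_length_eq_zero hlen
    rw [rowsOf]
    simp [hany]
  | succ n ih =>
    intro cols h
    have hany : cols.any (fun c => !c.isEmpty) = true := by
      by_contra hf
      rw [Bool.not_eq_true] at hf
      have hall : ∀ c ∈ cols, c = [] := (pv_any_false_iff cols).mp hf
      have : (cols.map List.length).foldl max 0 = 0 := by
        rw [pv_fold_eq_zero]
        refine ⟨rfl, ?_⟩
        intro x hx
        rcases List.mem_map.mp hx with ⟨c, hc, rfl⟩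
        rw [hall c hc]; rfl
      omega
    rw [rowsOf, if_pos hany]
    have hfold : ((cols.map List.tail).map List.length).foldl max 0 = n := by
      have h2 := pv_fold_tail cols 0
      rw [h] at h2
      simpa using h2
    rw [ih _ hfold, List.range_succ_eq_map]
    simp only [List.map_cons, List.map_map]
    congr 1
    · apply List.map_congr_left
      intro w _
      cases w <;> simp
    · apply List.map_congr_left
      intro i _
      simp only [Function.comp]
      apply List.map_congr_left
      intro w _
      cases w <;> simp [List.getD]

theorem pv_main (text : String) : transpose_words text = transpose_words_alt text := by
  unfold transpose_words transpose_words_alt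
  rcases hw : PySem.Chars.split₀ text.toList with _ | ⟨w, t⟩
  · have h0 : rowsOf ([] : List (List Char)) = [] := by rw [rowsOf]; simp
    simp [h0, PySem.Chars.join]
    rfl
  · rw [if_neg (List.cons_ne_nil w t)]
    simp only [List.map_cons, PySem.List.max?_id_cons, Option.getD_some]
    have hfold : ((w :: t).map List.length).foldl max 0
        = (t.map List.length).foldl max w.length := by
      simp
    rw [pv_rowsOf_eq _ _ hfold]
    rw [List.map_map]
    refine congrArg String.ofList (congrArg (PySem.Chars.join ['\n']) ?_)
    apply List.map_congr_left
    intro i _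
    simp only [Function.comp, List.map_map, List.map_cons]
    refine congrArg (PySem.Chars.join [' ']) ?_
    rw [pv_getD_pad]
    refine congrArg (_ :: ·) ?_
    apply List.map_congr_left
    intro w' _
    simp only [Function.comp_apply]
    rw [pv_getD_pad]

-- ===== VERDICT (by name: the statement is the Claim_ definition above) =====
theorem transpose_words_spec : Claim_equal_transpose_words := by
  unfold Claim_equal_transpose_words Spec_transpose_words
  intro text _
  exact pv_main text
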